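-- pv_equiv track=rewrite | github.com/4lk4tr43/openresty-letsencrypt-autoreload | openresty/src/transform-configurations.py | get_blocks_start_index_and_level_and_name
-- ===== SOURCE A (Python) =====
-- def get_block_name(s, i):
--     start = i
--     while start >= 0:
--         start -= 1
--         c = s[start]
--         if c == ';' or c == '{' or c == '}':
--             break
--     return s[start + 1:i].replace('\n', '').strip()
--
-- def get_blocks_start_index_and_level_and_name(s):
--     tuples = []
--     mustache_count = 0
--     for i, c in enumerate(s):
--         if c == '{':
--             mustache_count += 1
--             tuples.append((i, mustache_count, get_block_name(s, i)))
--         elif c == '}':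
--             tuples.append((i, mustache_count, 'end'))
--             mustache_count -= 1
--     return tuples
-- ===== SOURCE B (Python) =====
-- def get_blocks_start_index_and_level_and_name(s):
--     tuples = []
--     mustache_count = 0
--     last_delim = -1
--     for i, c in enumerate(s):
--         if c == '{':
--             mustache_count += 1
--             tuples.append((i, mustache_count, s[last_delim + 1:i].replace('\n', '').strip()))
--             last_delim = i
--         elif c == '}':
--             tuples.append((i, mustache_count, 'end'))
--             mustache_count -= 1
--             last_delim = i
--         elif c == ';':
--             last_delim = i
--     return tuples
-- ===== Notes on version B (the rewrite author's own statement) =====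
-- stated objective: simpler
-- what changed: Replaces A's per-brace backward scan for the previous delimiter (the get_block_name helper) with a single forward pass that carries last_delim, so each block name is taken directly as s[last_delim+1:i].
import Mathlib
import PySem

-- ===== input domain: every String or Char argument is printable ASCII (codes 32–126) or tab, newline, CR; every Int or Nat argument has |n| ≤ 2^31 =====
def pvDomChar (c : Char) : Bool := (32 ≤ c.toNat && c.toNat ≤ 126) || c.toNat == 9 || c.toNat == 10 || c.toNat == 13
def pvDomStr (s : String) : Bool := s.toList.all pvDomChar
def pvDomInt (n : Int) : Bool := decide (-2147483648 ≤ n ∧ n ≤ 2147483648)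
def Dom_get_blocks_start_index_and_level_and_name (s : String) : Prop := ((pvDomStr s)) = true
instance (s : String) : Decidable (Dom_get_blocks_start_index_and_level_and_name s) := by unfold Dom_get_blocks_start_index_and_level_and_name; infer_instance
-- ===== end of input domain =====

-- B replaces A's per-brace backward delimiter scan by one forward pass that carries
-- the index of the last seen delimiter (objective: simpler single-pass decomposition).

-- shared by both ports: the name expression s[lo:i].replace('\n','').strip(),
-- written identically in both Pythons
def pvNameOf (l : List Char) (lo : Int) (i : Nat) : String :=
  String.ofList (PySem.Chars.strip (PySem.Chars.replace
    (PySem.List.slice l (some lo) (some (i : Int))) ['\n'] []))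

-- ===== PORT A =====
-- A's while loop in get_block_name: start := i, repeatedly start -= 1; stop at a
-- delimiter s[start] or when start reaches -1.  (When start becomes -1 Python peeks
-- at s[-1]; whether it breaks there or falls out of the loop, start is -1 either way,
-- so the 0-case returns -1 directly.)
def pvScanBack (l : List Char) : Nat → Int
  | 0 => -1
  | k + 1 =>
    let c := l.getD k ' '
    if c = ';' ∨ c = '{' ∨ c = '}' then (k : Int) else pvScanBack l k

def pvGetBlockName (l : List Char) (i : Nat) : String :=
  pvNameOf l (pvScanBack l i + 1) i

-- for i, c in enumerate(s): ...
def pvLoopA (l : List Char) : List Char → Nat → Int → List (Int × Int × String) → List (Int × Int × String)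
  | [], _, _, acc => acc
  | c :: rest, i, cnt, acc =>
    if c = '{' then
      pvLoopA l rest (i + 1) (cnt + 1) (acc ++ [((i : Int), cnt + 1, pvGetBlockName l i)])
    else if c = '}' then
      pvLoopA l rest (i + 1) (cnt - 1) (acc ++ [((i : Int), cnt, "end")])
    else
      pvLoopA l rest (i + 1) cnt acc

def get_blocks_start_index_and_level_and_name (s : String) : List (Int × Int × String) :=
  pvLoopA s.toList s.toList 0 0 []

-- ===== PORT B =====
-- single forward pass carrying last_delim
def pvLoopB (l : List Char) : List Char → Nat → Int → Int → List (Int × Int × String) → List (Int × Int × String)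
  | [], _, _, _, acc => acc
  | c :: rest, i, cnt, ld, acc =>
    if c = '{' then
      pvLoopB l rest (i + 1) (cnt + 1) (i : Int) (acc ++ [((i : Int), cnt + 1, pvNameOf l (ld + 1) i)])
    else if c = '}' then
      pvLoopB l rest (i + 1) (cnt - 1) (i : Int) (acc ++ [((i : Int), cnt, "end")])
    else if c = ';' then
      pvLoopB l rest (i + 1) cnt (i : Int) acc
    else
      pvLoopB l rest (i + 1) cnt ld acc

def get_blocks_start_index_and_level_and_name_alt (s : String) : List (Int × Int × String) :=
  pvLoopB s.toList s.toList 0 0 (-1) []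

-- ===== PRECONDITION & SPEC =====
def Spec_get_blocks_start_index_and_level_and_name (s : String) (out : List (Int × Int × String)) : Prop := out = get_blocks_start_index_and_level_and_name_alt s
instance (s : String) (out : List (Int × Int × String)) : Decidable (Spec_get_blocks_start_index_and_level_and_name s out) := by unfold Spec_get_blocks_start_index_and_level_and_name; infer_instance

-- ===== CLAIM (what is proved, stated in full; the proofs are below) =====
def Claim_equal_get_blocks_start_index_and_level_and_name : Prop := ∀ (s : String), Dom_get_blocks_start_index_and_level_and_name s → Spec_get_blocks_start_index_and_level_and_name s (get_blocks_start_index_and_level_and_name s)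

-- ===== LEMMAS AND PROOFS =====

-- the forward-carried last_delim equals the value A's backward scan computes
theorem pvLoop_agree (l : List Char) :
    ∀ (rest : List Char) (i : Nat) (cnt : Int) (acc : List (Int × Int × String)),
      l.drop i = rest →
      pvLoopA l rest i cnt acc = pvLoopB l rest i cnt (pvScanBack l i) acc := by
  intro rest
  induction rest with
  | nil => intro i cnt acc _; rfl
  | cons c rest ih =>
    intro i cnt acc hdrop
    have h0 : l[i]? = some c := by
      have h := List.head?_drop (l := l) (i := i)
      rw [hdrop] at h
      simpa using h.symm
    have hdrop' : l.drop (i + 1) = rest := by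
      rw [← List.tail_drop, hdrop]; rfl
    have hsucc : pvScanBack l (i + 1)
        = if c = ';' ∨ c = '{' ∨ c = '}' then (i : Int) else pvScanBack l i := by
      simp [pvScanBack, h0]
    by_cases h1 : c = '{'
    · simp [pvLoopA, pvLoopB, h1, pvGetBlockName, ih (i+1) _ _ hdrop', hsucc]
    · by_cases h2 : c = '}'
      · simp [pvLoopA, pvLoopB, h2, ih (i+1) _ _ hdrop', hsucc]
      · by_cases h3 : c = ';'
        · simp [pvLoopA, pvLoopB, h3, ih (i+1) _ _ hdrop', hsucc]
        · simp [pvLoopA, pvLoopB, h1, h2, h3, ih (i+1) _ _ hdrop', hsucc]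

-- ===== VERDICT (by name: the statement is the Claim_ definition above) =====
theorem get_blocks_start_index_and_level_and_name_spec : Claim_equal_get_blocks_start_index_and_level_and_name := by
  intro s _
  unfold Spec_get_blocks_start_index_and_level_and_name
  unfold get_blocks_start_index_and_level_and_name get_blocks_start_index_and_level_and_name_alt
  have h := pvLoop_agree s.toList s.toList 0 0 [] (by simp)
  simpa [pvScanBack] using h
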